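-- pv_equiv track=rewrite | github.com/png261/graduation-thesis | src/backend/scripts/validate_service_boundaries.py | _prefix_overlaps
-- ===== SOURCE A (Python) =====
-- def _prefix_overlaps(values: list[str]) -> list[str]:
--     overlaps: list[str] = []
--     ordered = sorted(values)
--     for index, value in enumerate(ordered):
--         for candidate in ordered[index + 1 :]:
--             if not candidate.startswith(f"{value}."):
--                 continue
--             overlaps.append(f"{value} overlaps {candidate}")
--     return overlaps
-- ===== SOURCE B (Python) =====
-- def _bisect_left(a, x, lo, hi):
--     while lo < hi:
--         mid = (lo + hi) // 2
--         if a[mid] < x: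
--             lo = mid + 1
--         else:
--             hi = mid
--     return lo
--
--
-- def _prefix_overlaps(values: list[str]) -> list[str]:
--     # Sorted order makes every "value." prefix-block contiguous: binary-search
--     # its range [lo, hi) instead of scanning all later entries.
--     overlaps: list[str] = []
--     ordered = sorted(values)
--     n = len(ordered)
--     for value in ordered:
--         lo = _bisect_left(ordered, value + ".", 0, n)
--         hi = _bisect_left(ordered, value + "/", 0, n)
--         for candidate in ordered[lo:hi]:
--             overlaps.append(f"{value} overlaps {candidate}")
--     return overlaps
-- ===== Notes on version B (the rewrite author's own statement) =====
-- stated objective: faster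
-- what changed: Replaces the quadratic scan of all later sorted entries with two binary searches per value that locate the contiguous block of strings starting with 'value.', iterating only over actual matches.
import Mathlib
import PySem

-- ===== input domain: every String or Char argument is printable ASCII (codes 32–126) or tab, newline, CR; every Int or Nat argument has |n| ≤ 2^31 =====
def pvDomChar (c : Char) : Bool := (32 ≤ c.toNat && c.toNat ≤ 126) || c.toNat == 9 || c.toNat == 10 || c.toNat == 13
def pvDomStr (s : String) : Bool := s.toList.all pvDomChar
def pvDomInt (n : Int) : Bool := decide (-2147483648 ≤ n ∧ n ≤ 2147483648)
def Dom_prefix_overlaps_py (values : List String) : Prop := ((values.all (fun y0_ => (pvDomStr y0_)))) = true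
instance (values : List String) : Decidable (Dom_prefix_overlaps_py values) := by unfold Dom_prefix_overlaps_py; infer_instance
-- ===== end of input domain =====

-- B replaces A's scan of every later sorted entry by two binary searches per value that
-- bound the contiguous block of strings starting with "value." (objective: faster).

-- ===== PORT A =====
def prefix_overlaps_py (values : List String) : List String :=
  let ordered := PySem.List.sorted values (fun x => x)
  (PySem.List.enumerate ordered 0).foldl
    (fun overlaps p =>
      (PySem.List.slice ordered (some (p.1 + 1)) none).foldl
        (fun acc candidate =>
          if ¬ (PySem.Str.startswith candidate (p.2 ++ ".")) = true then acc
          else acc ++ [p.2 ++ " overlaps " ++ candidate])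
        overlaps)
    []

-- ===== PORT B =====
-- hand-written bisect_left from Source B (while-loop as recursion on hi - lo)
def bisectLeftStr (a : List String) (x : String) (lo hi : Nat) : Nat :=
  if _h : lo < hi then
    let mid := (lo + hi) / 2
    if a.getD mid "" < x then bisectLeftStr a x (mid + 1) hi
    else bisectLeftStr a x lo mid
  else lo
  termination_by hi - lo
  decreasing_by all_goals omega

def prefix_overlaps_py_alt (values : List String) : List String :=
  let ordered := PySem.List.sorted values (fun x => x)
  let n := ordered.length
  ordered.foldl
    (fun overlaps value =>
      let lo := bisectLeftStr ordered (value ++ ".") 0 n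
      let hi := bisectLeftStr ordered (value ++ "/") 0 n
      (PySem.List.slice ordered (some (lo : Int)) (some (hi : Int))).foldl
        (fun acc candidate => acc ++ [value ++ " overlaps " ++ candidate])
        overlaps)
    []

-- ===== PRECONDITION & SPEC =====
def Spec_prefix_overlaps_py (values : List String) (out : List String) : Prop := out = prefix_overlaps_py_alt values
instance (values : List String) (out : List String) : Decidable (Spec_prefix_overlaps_py values out) := by unfold Spec_prefix_overlaps_py; infer_instance

-- ===== CLAIM (what is proved, stated in full; the proofs are below) =====
def Claim_equal_prefix_overlaps_py : Prop := ∀ (values : List String), Dom_prefix_overlaps_py values → Spec_prefix_overlaps_py values (prefix_overlaps_py values)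

-- ===== LEMMAS AND PROOFS =====

-- the inner-loop predicate both programs test candidates with
def pvMatch (v : String) (c : String) : Bool := PySem.Str.startswith c (v ++ ".")

-- a character between '.' (inclusive) and '/' (exclusive) is '.'
lemma pv_char_between (c : Char) (h1 : ¬ c < '.') (h2 : c < '/') : c = '.' := by
  have e1 : ('.' : Char).val.toNat = 46 := by decide
  have e2 : ('/' : Char).val.toNat = 47 := by decide
  have a1 : 46 ≤ c.val.toNat := by
    by_contra h
    exact h1 (by simp only [Char.lt_def, UInt32.lt_iff_toNat_lt]; omega)
  have a2 : c.val.toNat < 47 := by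
    have := h2; simp only [Char.lt_def, UInt32.lt_iff_toNat_lt] at this; omega
  exact Char.ext (UInt32.toNat_inj.mp (by omega))

-- a list is lexicographically below any proper extension of itself
lemma pv_lt_append_cons (l : List Char) (c : Char) (t : List Char) : l < l ++ c :: t := by
  induction l with
  | nil => exact List.nil_lt_cons c t
  | cons a as ih => exact List.cons_lt_cons_iff.mpr (Or.inr ⟨rfl, ih⟩)

lemma pv_dot_lt_slash (v : List Char) : v ++ ['.'] < v ++ ['/'] := by
  induction v with
  | nil => exact List.cons_lt_cons_iff.mpr (Or.inl (by decide))
  | cons a as ih => exact List.cons_lt_cons_iff.mpr (Or.inr ⟨rfl, ih⟩)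

-- the half-open interval [v ++ ".", v ++ "/") is exactly the strings with prefix v ++ "."
lemma pv_interval_iff (v : List Char) (s : List Char) :
    (¬ s < v ++ ['.'] ∧ s < v ++ ['/']) ↔ v ++ ['.'] <+: s := by
  induction v generalizing s with
  | nil =>
    cases s with
    | nil => simp [List.nil_lt_cons]
    | cons c t =>
      simp only [List.nil_append, List.cons_lt_cons_iff, List.cons_prefix_cons,
        List.not_lt_nil, and_false, or_false, List.nil_prefix, and_true]
      constructor
      · rintro ⟨h1, h2⟩
        exact (pv_char_between c h1 h2).symm
      · rintro rfl
        exact ⟨by decide, by decide⟩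
  | cons a as ih =>
    cases s with
    | nil =>
      simp only [List.cons_append]
      constructor
      · rintro ⟨h1, -⟩; exact absurd (List.nil_lt_cons _ _) h1
      · intro h; exact absurd h (by simp)
    | cons c t =>
      simp only [List.cons_append, List.cons_lt_cons_iff, List.cons_prefix_cons]
      constructor
      · rintro ⟨h1, h2⟩
        rcases h2 with h2 | ⟨rfl, h2'⟩
        · exact absurd (Or.inl h2) h1
        · exact ⟨rfl, (ih t).mp ⟨fun h => h1 (Or.inr ⟨rfl, h⟩), h2'⟩⟩
      · rintro ⟨rfl, hp⟩
        have hm := (ih t).mpr hp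
        refine ⟨?_, Or.inr ⟨rfl, hm.2⟩⟩
        rintro (h | ⟨-, h⟩)
        · exact lt_irrefl _ h
        · exact hm.1 h

lemma pv_toList_dot (v : String) : (v ++ ".").toList = v.toList ++ ['.'] := by
  rw [String.toList_append]; rfl

lemma pv_toList_slash (v : String) : (v ++ "/").toList = v.toList ++ ['/'] := by
  rw [String.toList_append]; rfl

-- the string interval bounds as Strings
lemma pv_str_dot_lt_slash (v : String) : (v ++ ".") < (v ++ "/") := by
  rw [String.lt_iff_toList_lt, pv_toList_dot, pv_toList_slash]
  exact pv_dot_lt_slash v.toList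

-- pvMatch as a string-interval membership
lemma pv_match_iff_interval (v c : String) :
    pvMatch v c = true ↔ ((v ++ ".") ≤ c ∧ c < v ++ "/") := by
  rw [pvMatch, PySem.Str.startswith_eq, PySem.Chars.startswith_iff, pv_toList_dot,
    ← not_lt (a := c) (b := v ++ "."), String.lt_iff_toList_lt, String.lt_iff_toList_lt,
    pv_toList_dot, pv_toList_slash]
  exact (pv_interval_iff v.toList c.toList).symm

-- a string matched by pvMatch v is strictly above v
lemma pv_match_gt (v c : String) (h : pvMatch v c = true) : v < c := by
  rw [pvMatch, PySem.Str.startswith_eq, PySem.Chars.startswith_iff] at h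
  rcases h with ⟨t, ht⟩
  rw [String.lt_iff_toList_lt, ← ht, pv_toList_dot, List.append_assoc]
  exact pv_lt_append_cons _ _ _

lemma pv_le_no_match (v c : String) (h : c ≤ v) : pvMatch v c = false := by
  rw [Bool.eq_false_iff]
  intro hm
  exact absurd h (not_le.mpr (pv_match_gt v c hm))

-- getElem monotonicity from Pairwise (· ≤ ·)
lemma pv_getElem_mono (l : List String) (h : l.Pairwise (· ≤ ·)) (i j : Nat)
    (hij : i ≤ j) (hj : j < l.length) : l[i]'(by omega) ≤ l[j] := by
  rcases Nat.eq_or_lt_of_le hij with rfl | hlt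
  · rfl
  · exact List.pairwise_iff_getElem.mp h i j (by omega) hj hlt

-- correctness of the hand-written bisect_left on a sorted list
lemma bisectLeftStr_spec (a : List String) (x : String) (lo hi : Nat)
    (hs : a.Pairwise (· ≤ ·)) (hlo : lo ≤ hi) (hhi : hi ≤ a.length) :
    lo ≤ bisectLeftStr a x lo hi ∧ bisectLeftStr a x lo hi ≤ hi ∧
    (∀ j, lo ≤ j → j < bisectLeftStr a x lo hi → (hj : j < a.length) → a[j] < x) ∧
    (∀ j, bisectLeftStr a x lo hi ≤ j → j < hi → (hj : j < a.length) → x ≤ a[j]) := by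
  fun_induction bisectLeftStr a x lo hi with
  | case1 lo hi h mid hcmp ih =>
    have hmid : mid < hi := by omega
    obtain ⟨i1, i2, i3, i4⟩ := ih (by omega) hhi
    refine ⟨by omega, i2, ?_, i4⟩
    intro j hj1 hj2 hj
    by_cases hjm : j ≤ mid
    · have hmlen : mid < a.length := by omega
      have e : a.getD mid "" = a[mid] := List.getD_eq_getElem a "" hmlen
      calc a[j] ≤ a[mid] := pv_getElem_mono a hs j mid hjm hmlen
        _ < x := by rw [← e]; exact hcmp
    · exact i3 j (by omega) hj2 hj
  | case2 lo hi h mid hcmp ih =>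
    have hmid : lo ≤ mid := by omega
    obtain ⟨i1, i2, i3, i4⟩ := ih hmid (by omega)
    refine ⟨i1, by omega, i3, ?_⟩
    intro j hj1 hj2 hj
    by_cases hjm : mid ≤ j
    · have hmlen : mid < a.length := by omega
      have e : a.getD mid "" = a[mid] := List.getD_eq_getElem a "" hmlen
      have hx : x ≤ a[mid] := by rw [← e]; exact not_lt.mp hcmp
      exact le_trans hx (pv_getElem_mono a hs mid j hjm hj)
    · exact i4 j hj1 (by omega) hj
  | case3 lo hi h =>
    exact ⟨le_rfl, by omega, by omega, by omega⟩

-- a filter whose true-set is exactly the index window [r₁, r₂) is the window itself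
lemma pv_filter_eq_drop_take {α : Type} (a : List α) (P : α → Bool) (r₁ r₂ : Nat)
    (h12 : r₁ ≤ r₂) (h2 : r₂ ≤ a.length)
    (hlow : ∀ j, j < r₁ → (hj : j < a.length) → P a[j] = false)
    (hmid : ∀ j, r₁ ≤ j → j < r₂ → (hj : j < a.length) → P a[j] = true)
    (hhigh : ∀ j, r₂ ≤ j → (hj : j < a.length) → P a[j] = false) :
    a.filter P = (a.drop r₁).take (r₂ - r₁) := by
  conv_lhs => rw [← List.take_append_drop r₁ a,
    ← List.take_append_drop (r₂ - r₁) (a.drop r₁), List.drop_drop]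
  have hr : r₁ + (r₂ - r₁) = r₂ := by omega
  rw [hr, List.filter_append, List.filter_append]
  have e1 : (a.take r₁).filter P = [] := by
    rw [List.filter_eq_nil_iff]
    intro x hx
    rw [List.mem_take_iff_getElem] at hx
    obtain ⟨i, hi, hix⟩ := hx
    have hi1 : i < r₁ := lt_of_lt_of_le hi (min_le_left _ _)
    have hi2 : i < a.length := lt_of_lt_of_le hi (min_le_right _ _)
    rw [← hix]
    simp [hlow i hi1 hi2]
  have e2 : ((a.drop r₁).take (r₂ - r₁)).filter P = (a.drop r₁).take (r₂ - r₁) := by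
    rw [List.filter_eq_self]
    intro x hx
    rw [List.mem_take_iff_getElem] at hx
    obtain ⟨i, hi, hix⟩ := hx
    have hi2 : i < (a.drop r₁).length := lt_of_lt_of_le hi (min_le_right _ _)
    have hi3 : r₁ + i < a.length := by simp at hi2; omega
    rw [← hix, List.getElem_drop]
    exact hmid (r₁ + i) (by omega) (by
      have hi1 : i < r₂ - r₁ := lt_of_lt_of_le hi (min_le_left _ _); omega) hi3
  have e3 : (a.drop r₂).filter P = [] := by
    rw [List.filter_eq_nil_iff]
    intro x hx
    rw [List.mem_iff_getElem] at hx
    obtain ⟨i, hi, hix⟩ := hx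
    have hi3 : r₂ + i < a.length := by simp at hi; omega
    rw [← hix, List.getElem_drop]
    simp [hhigh (r₂ + i) (by omega) hi3]
  rw [e1, e2, e3, List.nil_append, List.append_nil]

-- B's two binary searches delimit exactly the pvMatch-filtered list
lemma pv_bisect_block (ordered : List String) (hs : ordered.Pairwise (· ≤ ·)) (v : String) :
    PySem.List.slice ordered
        (some ((bisectLeftStr ordered (v ++ ".") 0 ordered.length : Nat) : Int))
        (some ((bisectLeftStr ordered (v ++ "/") 0 ordered.length : Nat) : Int))
      = ordered.filter (fun c => pvMatch v c) := by
  set n := ordered.length with hn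
  set lo := bisectLeftStr ordered (v ++ ".") 0 n with hlo
  set hi := bisectLeftStr ordered (v ++ "/") 0 n with hhi
  obtain ⟨-, s12, s13, s14⟩ := bisectLeftStr_spec ordered (v ++ ".") 0 n hs (Nat.zero_le n) le_rfl
  obtain ⟨-, s22, s23, s24⟩ := bisectLeftStr_spec ordered (v ++ "/") 0 n hs (Nat.zero_le n) le_rfl
  have hlohi : lo ≤ hi := by
    by_contra h
    have h1 : hi < lo := by omega
    have h2 : hi < n := by omega
    have ha : ordered[hi] < (v ++ ".") := s13 hi (Nat.zero_le hi) h1 h2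
    have hb : (v ++ "/") ≤ ordered[hi] := s24 hi le_rfl h2 h2
    exact absurd (lt_trans (lt_of_le_of_lt hb ha) (pv_str_dot_lt_slash v)) (lt_irrefl _)
  rw [PySem.List.slice_natCast]
  rw [pv_filter_eq_drop_take ordered (fun c => pvMatch v c) lo hi hlohi s22]
  · intro j hj1 hj
    rw [Bool.eq_false_iff]
    intro hm
    have := ((pv_match_iff_interval v ordered[j]).mp hm).1
    exact absurd (s13 j (Nat.zero_le j) hj1 hj) (not_lt.mpr this)
  · intro j hj1 hj2 hj
    exact (pv_match_iff_interval v ordered[j]).mpr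
      ⟨s14 j hj1 (by omega) hj, s23 j (Nat.zero_le j) hj2 hj⟩
  · intro j hj1 hj
    rw [Bool.eq_false_iff]
    intro hm
    have := ((pv_match_iff_interval v ordered[j]).mp hm).2
    exact absurd this (not_lt.mpr (s24 j hj1 hj hj))

-- A's scan of the later entries is the same filter (nothing at or before position i matches)
lemma pv_tail_filter (pre rest : List String) (v : String)
    (hs : (pre ++ v :: rest).Pairwise (· ≤ ·)) :
    rest.filter (fun c => pvMatch v c) = (pre ++ v :: rest).filter (fun c => pvMatch v c) := by
  rw [List.filter_append, List.filter_cons]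
  have hvle : ∀ x ∈ pre, x ≤ v := by
    intro x hx
    exact (List.pairwise_append.mp hs).2.2 x hx v (List.mem_cons_self)
  have e1 : pre.filter (fun c => pvMatch v c) = [] := by
    rw [List.filter_eq_nil_iff]
    intro x hx
    simp [pv_le_no_match v x (hvle x hx)]
  rw [e1, pv_le_no_match v v le_rfl]
  simp

-- main loop correspondence, walked along the sorted list
lemma pv_main (ordered : List String) (hs : ordered.Pairwise (· ≤ ·)) :
    ∀ (suf pre : List String), ordered = pre ++ suf →
    (PySem.List.enumerate suf (pre.length : Int)).flatMap
      (fun p => ((PySem.List.slice ordered (some (p.1 + 1)) none).filter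
          (fun c => pvMatch p.2 c)).map (fun c => p.2 ++ " overlaps " ++ c))
    = suf.flatMap (fun v =>
        (PySem.List.slice ordered
            (some ((bisectLeftStr ordered (v ++ ".") 0 ordered.length : Nat) : Int))
            (some ((bisectLeftStr ordered (v ++ "/") 0 ordered.length : Nat) : Int))).map
          (fun c => v ++ " overlaps " ++ c)) := by
  intro suf
  induction suf with
  | nil => intro pre hpre; simp [PySem.List.enumerate]
  | cons v rest ih =>
    intro pre hpre
    rw [PySem.List.enumerate_cons, List.flatMap_cons, List.flatMap_cons]
    have hsplit : ordered = (pre ++ [v]) ++ rest := by simp [hpre]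
    congr 1
    · -- head block
      have hcast : ((pre.length : Int) + 1) = (((pre.length + 1 : Nat)) : Int) := by push_cast; ring
      have hdrop : PySem.List.slice ordered (some ((pre.length : Int) + 1)) none = rest := by
        rw [hcast, PySem.List.slice_from_natCast, hsplit]
        have : pre.length + 1 = (pre ++ [v]).length := by simp
        rw [this, List.drop_left]
      rw [hdrop, pv_bisect_block ordered hs v]
      rw [pv_tail_filter pre rest v (by rw [← hpre]; exact hs), ← hpre]
    · have hlen : (pre.length : Int) + 1 = (((pre ++ [v]).length : Nat) : Int) := by
        simp
      rw [hlen]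
      exact ih (pre ++ [v]) hsplit

-- rewrite A's "continue" branch into the filter-shaped if
lemma pv_if_not (X : Bool) (acc : List String) (y : String) :
    (if ¬ X = true then acc else acc ++ [y]) = (if X = true then acc ++ [y] else acc) := by
  cases X <;> simp

-- ===== VERDICT (by name: the statement is the Claim_ definition above) =====
theorem prefix_overlaps_py_spec : Claim_equal_prefix_overlaps_py := by
  unfold Claim_equal_prefix_overlaps_py Spec_prefix_overlaps_py
  intro values _
  unfold prefix_overlaps_py prefix_overlaps_py_alt
  dsimp only
  set ordered := PySem.List.sorted values (fun x => x) with hord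
  have hs : ordered.Pairwise (· ≤ ·) := PySem.List.sorted_pairwise values (fun x => x)
  simp only [pv_if_not, PySem.List.foldl_append_if, PySem.List.foldl_append_eq_flatMap]
  rw [List.nil_append, List.nil_append]
  have := pv_main ordered hs ordered [] (by simp)
  simpa [pvMatch, ← List.map_eq_flatMap] using this
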